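-- pv_equiv track=rewrite | github.com/kh277/BOJ | 백준/Gold/14066. Kocka/Kocka.py | solve
-- ===== SOURCE A (Python) =====
-- block = [
--     [None, None, '+', '-', '-', '-', '+'],
--     [None, '/', ' ', ' ', ' ', '/', '|'],
--     ['+', '-', '-', '-', '+', ' ', '|'],
--     ['|', ' ', ' ', ' ', '|', ' ', '+'],
--     ['|', ' ', ' ', ' ', '|', '/'],
--     ['+', '-', '-', '-', '+']]
--
-- def makeBlock(sY, sX, grid):
--     curY = sY-5
--     for i in block:
--         curX = sX
--         for j in i:
--             if j != None:
--                 grid[curY][curX] = j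
--             curX += 1
--         curY += 1
--
-- def solve(Y, X, data):
--     # 가능한 최대 x, y, z 체크
--     maxZ = 0
--     maxY = 5
--     maxX = 4*X + 2*Y + 1
--     for y in data:
--         maxZ = max(maxZ, max(y))
--     for y in range(Y-1, -1, -1):
--         z = max(data[y])
--         needY = 3*z + 3 + 2*(Y-1 - y)
--         maxY = max(maxY, needY)
--
--     # 격자에 z+, y+, x+ 순서대로 배치
--     grid = [['.'] * maxX for _ in range(maxY)]
--     for z in range(1, maxZ+1):
--         for y in range(Y):
--             for x in range(X):
--                 if data[y][x] >= z:
--                     startY = maxY-1 - 2*(Y-y-1) - 3*(z-1)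
--                     startX = 2*(Y-y+1) + 4*x - 4
--                     makeBlock(startY, startX, grid)
--     return grid
-- ===== SOURCE B (Python) =====
-- # B: occlusion/paint-once renderer — same precomputation, but blocks are drawn
-- # front-to-back (z, y, x all descending) from a flat sprite cell list, and each
-- # cell is painted only if still empty ('.'), so no write is ever overwritten.
-- CELLS = [
--     (5, 4, '+'), (5, 3, '-'), (5, 2, '-'), (5, 1, '-'), (5, 0, '+'),
--     (4, 5, '/'), (4, 4, '|'), (4, 3, ' '), (4, 2, ' '), (4, 1, ' '), (4, 0, '|'),
--     (3, 6, '+'), (3, 5, ' '), (3, 4, '|'), (3, 3, ' '), (3, 2, ' '), (3, 1, ' '), (3, 0, '|'),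
--     (2, 6, '|'), (2, 5, ' '), (2, 4, '+'), (2, 3, '-'), (2, 2, '-'), (2, 1, '-'), (2, 0, '+'),
--     (1, 6, '|'), (1, 5, '/'), (1, 4, ' '), (1, 3, ' '), (1, 2, ' '), (1, 1, '/'),
--     (0, 6, '+'), (0, 5, '-'), (0, 4, '-'), (0, 3, '-'), (0, 2, '+'),
-- ]
--
-- def paintBlock(sY, sX, grid):
--     for dy, dx, ch in CELLS:
--         ty, tx = sY - 5 + dy, sX + dx
--         if grid[ty][tx] == '.':
--             grid[ty][tx] = ch
--
-- def solve(Y, X, data):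
--     maxZ = 0
--     maxY = 5
--     maxX = 4*X + 2*Y + 1
--     for row in data:
--         maxZ = max(maxZ, max(row))
--     for y in range(Y-1, -1, -1):
--         z = max(data[y])
--         maxY = max(maxY, 3*z + 3 + 2*(Y-1-y))
--     grid = [['.'] * maxX for _ in range(maxY)]
--     for z in range(maxZ, 0, -1):
--         for y in range(Y-1, -1, -1):
--             for x in range(X-1, -1, -1):
--                 if data[y][x] >= z:
--                     paintBlock(maxY-1 - 2*(Y-y-1) - 3*(z-1), 2*(Y-y+1) + 4*x - 4, grid)
--     return grid
-- ===== Notes on version B (the rewrite author's own statement) =====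
-- stated objective: alternative
-- what changed: The painter is replaced by a front-to-back occlusion renderer: blocks are traversed in exactly reversed order (z, y, x all descending) over a flat precomputed sprite-cell list, and each grid cell is painted only while it is still '.', so first writer wins instead of last writer wins; the maxZ/maxY/maxX precomputation is kept.
import Mathlib
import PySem

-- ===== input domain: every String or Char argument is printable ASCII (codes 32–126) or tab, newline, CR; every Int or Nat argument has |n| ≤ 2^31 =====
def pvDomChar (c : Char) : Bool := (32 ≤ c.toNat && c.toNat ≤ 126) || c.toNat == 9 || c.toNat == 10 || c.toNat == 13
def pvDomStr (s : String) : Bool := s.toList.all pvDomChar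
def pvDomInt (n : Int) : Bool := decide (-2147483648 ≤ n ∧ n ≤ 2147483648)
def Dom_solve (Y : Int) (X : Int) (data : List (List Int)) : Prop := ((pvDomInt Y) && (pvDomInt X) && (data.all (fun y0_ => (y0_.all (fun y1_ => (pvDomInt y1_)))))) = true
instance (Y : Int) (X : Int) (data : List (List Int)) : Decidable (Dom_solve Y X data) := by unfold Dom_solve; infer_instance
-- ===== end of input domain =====

-- B renders the same picture as an occlusion renderer: it traverses the blocks front-to-back
-- (z, y, x descending) over a flat sprite-cell list and paints each grid cell only while it is
-- still '.', where A paints back-to-front and overwrites (alternative strategy, same cost).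

-- ===== PORT A =====
def blockL : List (List (Option String)) :=
  [[none, none, some "+", some "-", some "-", some "-", some "+"],
   [none, some "/", some " ", some " ", some " ", some "/", some "|"],
   [some "+", some "-", some "-", some "-", some "+", some " ", some "|"],
   [some "|", some " ", some " ", some " ", some "|", some " ", some "+"],
   [some "|", some " ", some " ", some " ", some "|", some "/"],
   [some "+", some "-", some "-", some "-", some "+"]]

def makeBlock (sY sX : Int) (grid : List (List String)) : List (List String) :=
  (blockL.foldl (fun (st : List (List String) × Int) row =>
      let inner := row.foldl (fun (st2 : List (List String) × Int) j =>
          ((match j with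
            | some c => PySem.List.pySetD st2.1 st.2
                (PySem.List.pySetD (PySem.List.pyGetD st2.1 st.2 []) st2.2 c)
            | none => st2.1),
           st2.2 + 1)) (st.1, sX)
      (inner.1, st.2 + 1)) (grid, sY - 5)).1

def solve (Y : Int) (X : Int) (data : List (List Int)) : List (List String) :=
  -- max(row) raises on an empty row: the `.getD 0` default is never reached under Pre_solve
  let maxZ := data.foldl (fun m row => max m ((PySem.List.max? row id).getD 0)) 0
  let maxX := 4*X + 2*Y + 1
  let maxY := (PySem.List.pyRange (Y-1) (-1) (-1)).foldl (fun m y =>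
      let z := (PySem.List.max? (PySem.List.pyGetD data y []) id).getD 0
      max m (3*z + 3 + 2*(Y-1 - y))) 5
  let grid := List.replicate maxY.toNat (List.replicate maxX.toNat ".")
  (PySem.List.pyRange 1 (maxZ+1) 1).foldl (fun g z =>
    (PySem.List.pyRange 0 Y 1).foldl (fun g y =>
      (PySem.List.pyRange 0 X 1).foldl (fun g x =>
        if PySem.List.pyGetD (PySem.List.pyGetD data y []) x 0 ≥ z then
          makeBlock (maxY - 1 - 2*(Y-y-1) - 3*(z-1)) (2*(Y-y+1) + 4*x - 4) g
        else g) g) g) grid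

-- ===== PORT B =====
def cellsL : List (Int × Int × String) :=
  [(5, 4, "+"), (5, 3, "-"), (5, 2, "-"), (5, 1, "-"), (5, 0, "+"),
   (4, 5, "/"), (4, 4, "|"), (4, 3, " "), (4, 2, " "), (4, 1, " "), (4, 0, "|"),
   (3, 6, "+"), (3, 5, " "), (3, 4, "|"), (3, 3, " "), (3, 2, " "), (3, 1, " "), (3, 0, "|"),
   (2, 6, "|"), (2, 5, " "), (2, 4, "+"), (2, 3, "-"), (2, 2, "-"), (2, 1, "-"), (2, 0, "+"),
   (1, 6, "|"), (1, 5, "/"), (1, 4, " "), (1, 3, " "), (1, 2, " "), (1, 1, "/"),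
   (0, 6, "+"), (0, 5, "-"), (0, 4, "-"), (0, 3, "-"), (0, 2, "+")]

def paintBlock (sY sX : Int) (grid : List (List String)) : List (List String) :=
  cellsL.foldl (fun g e =>
    if PySem.List.pyGetD (PySem.List.pyGetD g (sY - 5 + e.1) []) (sX + e.2.1) "" = "." then
      PySem.List.pySetD g (sY - 5 + e.1)
        (PySem.List.pySetD (PySem.List.pyGetD g (sY - 5 + e.1) []) (sX + e.2.1) e.2.2)
    else g) grid

def solve_alt (Y : Int) (X : Int) (data : List (List Int)) : List (List String) :=
  let maxZ := data.foldl (fun m row => max m ((PySem.List.max? row id).getD 0)) 0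
  let maxX := 4*X + 2*Y + 1
  let maxY := (PySem.List.pyRange (Y-1) (-1) (-1)).foldl (fun m y =>
      let z := (PySem.List.max? (PySem.List.pyGetD data y []) id).getD 0
      max m (3*z + 3 + 2*(Y-1 - y))) 5
  let grid := List.replicate maxY.toNat (List.replicate maxX.toNat ".")
  (PySem.List.pyRange maxZ 0 (-1)).foldl (fun g z =>
    (PySem.List.pyRange (Y-1) (-1) (-1)).foldl (fun g y =>
      (PySem.List.pyRange (X-1) (-1) (-1)).foldl (fun g x =>
        if PySem.List.pyGetD (PySem.List.pyGetD data y []) x 0 ≥ z then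
          paintBlock (maxY - 1 - 2*(Y-y-1) - 3*(z-1)) (2*(Y-y+1) + 4*x - 4) g
        else g) g) g) grid

-- ===== PRECONDITION & SPEC =====
-- Pre_solve = exactly the inputs on which the Python A returns normally: every row nonempty
-- (max([]) raises), data has at least Y rows when Y ≥ 1 (data[y] raises), and when some block
-- is actually drawn (Y ≥ 1, X ≥ 1, some entry ≥ 1) the first Y rows have at least X entries.
def Pre_solve (Y : Int) (X : Int) (data : List (List Int)) : Prop :=
  (∀ r ∈ data, r ≠ []) ∧ (1 ≤ Y → Y ≤ (data.length : Int)) ∧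
  ((1 ≤ Y ∧ 1 ≤ X ∧ ∃ r ∈ data, ∃ v ∈ r, 1 ≤ v) →
    ∀ r ∈ data.take Y.toNat, X ≤ (r.length : Int))
instance (Y : Int) (X : Int) (data : List (List Int)) : Decidable (Pre_solve Y X data) := by
  unfold Pre_solve; infer_instance

def pvWitness_solve : Int × Int × List (List Int) := (2, 2, [[1, 0], [0, 2]])

def Spec_solve (Y : Int) (X : Int) (data : List (List Int)) (out : List (List String)) : Prop := out = solve_alt Y X data
instance (Y : Int) (X : Int) (data : List (List Int)) (out : List (List String)) : Decidable (Spec_solve Y X data out) := by unfold Spec_solve; infer_instance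

-- ===== CLAIM (what is proved, stated in full; the proofs are below) =====
def Claim_equal_solve : Prop := ∀ (Y : Int) (X : Int) (data : List (List Int)), Dom_solve Y X data → Pre_solve Y X data → Spec_solve Y X data (solve Y X data)

-- ===== LEMMAS AND PROOFS =====

-- abstract write events: (row index, column index, character), Python index semantics
def ow (g : List (List String)) (e : Int × Int × String) : List (List String) :=
  PySem.List.pySetD g e.1 (PySem.List.pySetD (PySem.List.pyGetD g e.1 []) e.2.1 e.2.2)

def gw (g : List (List String)) (e : Int × Int × String) : List (List String) :=
  if PySem.List.pyGetD (PySem.List.pyGetD g e.1 []) e.2.1 "" = "." then ow g e else g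

-- the 36 sprite cells in A's (raster) order, as offsets
def offsA : List (Int × Int × String) :=
  [(0, 2, "+"), (0, 3, "-"), (0, 4, "-"), (0, 5, "-"), (0, 6, "+"),
   (1, 1, "/"), (1, 2, " "), (1, 3, " "), (1, 4, " "), (1, 5, "/"), (1, 6, "|"),
   (2, 0, "+"), (2, 1, "-"), (2, 2, "-"), (2, 3, "-"), (2, 4, "+"), (2, 5, " "), (2, 6, "|"),
   (3, 0, "|"), (3, 1, " "), (3, 2, " "), (3, 3, " "), (3, 4, "|"), (3, 5, " "), (3, 6, "+"),
   (4, 0, "|"), (4, 1, " "), (4, 2, " "), (4, 3, " "), (4, 4, "|"), (4, 5, "/"),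
   (5, 0, "+"), (5, 1, "-"), (5, 2, "-"), (5, 3, "-"), (5, 4, "+")]

def shift (sY sX : Int) (o : Int × Int × String) : Int × Int × String :=
  (sY - 5 + o.1, sX + o.2.1, o.2.2)

def evBlock (sY sX : Int) : List (Int × Int × String) := offsA.map (shift sY sX)

def evAll (Y X maxY maxZ : Int) (data : List (List Int)) : List (Int × Int × String) :=
  (PySem.List.pyRange 1 (maxZ+1) 1).flatMap (fun z =>
    (PySem.List.pyRange 0 Y 1).flatMap (fun y =>
      (PySem.List.pyRange 0 X 1).flatMap (fun x =>
        if PySem.List.pyGetD (PySem.List.pyGetD data y []) x 0 ≥ z then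
          evBlock (maxY - 1 - 2*(Y-y-1) - 3*(z-1)) (2*(Y-y+1) + 4*x - 4)
        else [])))

-- row-by-row event extraction for A's makeBlock
def rowEv (curY curX : Int) : List (Option String) → List (Int × Int × String)
  | [] => []
  | none :: r => rowEv curY (curX + 1) r
  | some c :: r => (curY, curX, c) :: rowEv curY (curX + 1) r

def blockEv (curY curX : Int) : List (List (Option String)) → List (Int × Int × String)
  | [] => []
  | row :: rows => rowEv curY curX row ++ blockEv (curY + 1) curX rows

theorem rowEv_fold (row : List (Option String)) : ∀ (curY curX : Int) (g : List (List String)),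
    row.foldl (fun (st2 : List (List String) × Int) j =>
      ((match j with
        | some c => PySem.List.pySetD st2.1 curY
            (PySem.List.pySetD (PySem.List.pyGetD st2.1 curY []) st2.2 c)
        | none => st2.1),
       st2.2 + 1)) (g, curX)
    = ((rowEv curY curX row).foldl ow g, curX + row.length) := by
  induction row with
  | nil => intro curY curX g; simp [rowEv]
  | cons j r ih =>
    intro curY curX g
    cases j with
    | none =>
      rw [List.foldl_cons, ih]
      simp only [rowEv, List.length_cons]
      refine congrArg _ ?_
      push_cast; ring
    | some c =>
      rw [List.foldl_cons, ih]
      simp only [rowEv, List.foldl_cons, List.length_cons]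
      refine congrArg _ ?_
      push_cast; ring

theorem blockEv_fold (rows : List (List (Option String))) :
    ∀ (curY sX : Int) (g : List (List String)),
    (rows.foldl (fun (st : List (List String) × Int) row =>
      let inner := row.foldl (fun (st2 : List (List String) × Int) j =>
          ((match j with
            | some c => PySem.List.pySetD st2.1 st.2
                (PySem.List.pySetD (PySem.List.pyGetD st2.1 st.2 []) st2.2 c)
            | none => st2.1),
           st2.2 + 1)) (st.1, sX)
      (inner.1, st.2 + 1)) (g, curY)).1
    = (blockEv curY sX rows).foldl ow g := by
  induction rows with
  | nil => intro curY sX g; simp [blockEv]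
  | cons row rows ih =>
    intro curY sX g
    rw [List.foldl_cons]
    dsimp only
    rw [rowEv_fold row curY sX g, ih]
    simp [blockEv, List.foldl_append]

theorem makeBlock_eq (sY sX : Int) (g : List (List String)) :
    makeBlock sY sX g = (blockEv (sY - 5) sX blockL).foldl ow g := by
  unfold makeBlock
  exact blockEv_fold blockL (sY - 5) sX g

theorem blockEv_eq (sY sX : Int) : blockEv (sY - 5) sX blockL = evBlock sY sX := by
  simp only [blockEv, rowEv, blockL, evBlock, offsA, shift, List.map_cons, List.map_nil,
    List.cons_append, List.nil_append, List.cons.injEq, Prod.mk.injEq, and_true, true_and]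
  omega

theorem cellsL_eq : cellsL = offsA.reverse := by decide

theorem paintBlock_eq (sY sX : Int) (g : List (List String)) :
    paintBlock sY sX g = ((evBlock sY sX).reverse).foldl gw g := by
  have h1 : paintBlock sY sX g = cellsL.foldl (fun g e => gw g (shift sY sX e)) g := rfl
  rw [h1, ← List.foldl_map, cellsL_eq, evBlock, List.map_reverse]

theorem rev_flatMap {α β : Type} (l : List α) (f : α → List β) :
    (l.flatMap f).reverse = l.reverse.flatMap (fun x => (f x).reverse) := by
  induction l with
  | nil => simp
  | cons a l ih => simp [ih]

theorem solve_eq_fold (Y X : Int) (data : List (List Int)) :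
    solve Y X data =
      (evAll Y X
        ((PySem.List.pyRange (Y-1) (-1) (-1)).foldl (fun m y =>
          max m (3*((PySem.List.max? (PySem.List.pyGetD data y []) id).getD 0) + 3 + 2*(Y-1 - y))) 5)
        (data.foldl (fun m row => max m ((PySem.List.max? row id).getD 0)) 0) data).foldl ow
      (List.replicate ((PySem.List.pyRange (Y-1) (-1) (-1)).foldl (fun m y =>
          max m (3*((PySem.List.max? (PySem.List.pyGetD data y []) id).getD 0) + 3 + 2*(Y-1 - y))) 5).toNat
        (List.replicate (4*X + 2*Y + 1).toNat ".")) := by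
  simp only [solve, evAll, List.foldl_flatMap]
  congr 1
  funext g z
  congr 1
  funext g y
  congr 1
  funext g x
  split_ifs with h
  · rw [makeBlock_eq, blockEv_eq]
  · rfl

theorem solve_alt_eq_fold (Y X : Int) (data : List (List Int)) :
    solve_alt Y X data =
      ((evAll Y X
        ((PySem.List.pyRange (Y-1) (-1) (-1)).foldl (fun m y =>
          max m (3*((PySem.List.max? (PySem.List.pyGetD data y []) id).getD 0) + 3 + 2*(Y-1 - y))) 5)
        (data.foldl (fun m row => max m ((PySem.List.max? row id).getD 0)) 0) data).reverse).foldl gw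
      (List.replicate ((PySem.List.pyRange (Y-1) (-1) (-1)).foldl (fun m y =>
          max m (3*((PySem.List.max? (PySem.List.pyGetD data y []) id).getD 0) + 3 + 2*(Y-1 - y))) 5).toNat
        (List.replicate (4*X + 2*Y + 1).toNat ".")) := by
  have hY : PySem.List.pyRange (Y-1) (-1) (-1) = (PySem.List.pyRange 0 Y 1).reverse := by
    rw [PySem.List.pyRange_neg_one_eq_reverse]; norm_num
  have hX : PySem.List.pyRange (X-1) (-1) (-1) = (PySem.List.pyRange 0 X 1).reverse := by
    rw [PySem.List.pyRange_neg_one_eq_reverse]; norm_num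
  have hZ : ∀ m : Int, PySem.List.pyRange m 0 (-1) = (PySem.List.pyRange 1 (m+1) 1).reverse := by
    intro m; rw [PySem.List.pyRange_neg_one_eq_reverse]; norm_num
  simp only [solve_alt, evAll, hY, hX, hZ, rev_flatMap, apply_ite List.reverse,
    List.reverse_nil, List.foldl_flatMap]
  congr 1
  funext g z
  congr 1
  funext g y
  congr 1
  funext g x
  split_ifs with h
  · rw [paintBlock_eq]
  · rfl

-- cell-level semantics
def cell (g : List (List String)) (y x : Nat) : String := (g.getD y []).getD x ""

def Shape (H W : Nat) (g : List (List String)) : Prop :=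
  g.length = H ∧ ∀ r ∈ g, r.length = W

def hit (H W : Nat) (e : Int × Int × String) (y x : Nat) : Bool :=
  decide (PySem.List.pyIdx? H e.1 = some y ∧ PySem.List.pyIdx? W e.2.1 = some x)

def firstW (H W : Nat) (E : List (Int × Int × String)) (y x : Nat) : Option String :=
  (E.find? (fun e => hit H W e y x)).map (fun e => e.2.2)

theorem pyIdx_lt {n : Nat} {i : Int} {k : Nat}
    (h : PySem.List.pyIdx? n i = some k) : k < n := by
  simp only [PySem.List.pyIdx?] at h
  split_ifs at h <;> simp_all <;> omega

theorem pySetD_cases {α : Type} (xs : List α) (i : Int) (v : α) :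
    PySem.List.pySetD xs i v =
      match PySem.List.pyIdx? xs.length i with
      | some n => xs.set n v
      | none => xs := by
  simp only [PySem.List.pySetD, PySem.List.pySet?]
  cases PySem.List.pyIdx? xs.length i <;> simp

theorem pyGetD_cases {α : Type} (xs : List α) (i : Int) (d : α) :
    PySem.List.pyGetD xs i d =
      match PySem.List.pyIdx? xs.length i with
      | some n => xs.getD n d
      | none => d := by
  simp only [PySem.List.pyGetD, PySem.List.pyGet?]
  cases h : PySem.List.pyIdx? xs.length i with
  | none => simp
  | some n =>
    have := pyIdx_lt h
    simp [List.getD, Option.getD, List.getElem?_eq_getElem this]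

theorem getD_set {α : Type} {l : List α} {n y : Nat} (v d : α) (hy : y < l.length) :
    (l.set n v).getD y d = if n = y then v else l.getD y d := by
  rw [List.getD_eq_getElem _ d (by simpa using hy), List.getElem_set]
  split_ifs with h
  · rfl
  · rw [List.getD_eq_getElem _ d hy]

theorem rowlen {H W : Nat} {g : List (List String)} (hS : Shape H W g)
    {y : Nat} (hy : y < H) : (g.getD y []).length = W := by
  have hylen : y < g.length := hS.1 ▸ hy
  rw [List.getD_eq_getElem _ _ hylen]
  exact hS.2 _ (List.getElem_mem hylen)

theorem shape_ow {H W : Nat} {g : List (List String)} (hS : Shape H W g)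
    (e : Int × Int × String) : Shape H W (ow g e) := by
  unfold ow
  rw [pySetD_cases]
  cases h1 : PySem.List.pyIdx? g.length e.1 with
  | none => exact hS
  | some n =>
    refine ⟨by simpa using hS.1, ?_⟩
    intro r hr
    rcases List.mem_or_eq_of_mem_set hr with h | h
    · exact hS.2 r h
    · subst h
      rw [PySem.List.length_pySetD, pyGetD_cases, h1]
      exact rowlen hS (hS.1 ▸ pyIdx_lt h1)

theorem shape_gw {H W : Nat} {g : List (List String)} (hS : Shape H W g)
    (e : Int × Int × String) : Shape H W (gw g e) := by
  unfold gw
  split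
  · exact shape_ow hS e
  · exact hS

theorem cell_ow {H W : Nat} {g : List (List String)} (hS : Shape H W g)
    (e : Int × Int × String) {y x : Nat} (hy : y < H) (hx : x < W) :
    cell (ow g e) y x = if hit H W e y x then e.2.2 else cell g y x := by
  have hlen := hS.1
  unfold cell ow
  rw [pySetD_cases, hlen]
  cases h1 : PySem.List.pyIdx? H e.1 with
  | none => simp [hit, h1]
  | some n =>
    have hn : n < H := pyIdx_lt h1
    have hrowget : PySem.List.pyGetD g e.1 [] = g.getD n [] := by
      rw [pyGetD_cases, hlen, h1]
    have hrlen : (g.getD n []).length = W := rowlen hS hn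
    rw [hrowget, pySetD_cases, hrlen]
    cases h2 : PySem.List.pyIdx? W e.2.1 with
    | none =>
      dsimp only
      have hset : g.set n (g.getD n []) = g := by
        rw [List.getD_eq_getElem _ _ (hlen ▸ hn)]
        exact List.set_getElem_self (hlen ▸ hn)
      rw [hset]
      simp [hit, h1, h2]
    | some m =>
      have hm : m < W := pyIdx_lt h2
      dsimp only
      rw [getD_set _ _ (hlen ▸ hy)]
      simp only [hit, h1, h2]
      by_cases hny : n = y
      · subst hny
        rw [if_pos rfl, getD_set _ _ (hrlen ▸ hx)]
        by_cases hmx : m = x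
        · subst hmx; simp
        · simp [hmx]
      · simp [hny]

theorem cell_gw {H W : Nat} {g : List (List String)} (hS : Shape H W g)
    (e : Int × Int × String) {y x : Nat} (hy : y < H) (hx : x < W) :
    cell (gw g e) y x = if hit H W e y x ∧ cell g y x = "." then e.2.2 else cell g y x := by
  have htest : hit H W e y x = true →
      PySem.List.pyGetD (PySem.List.pyGetD g e.1 []) e.2.1 "" = cell g y x := by
    intro hh
    simp only [hit, decide_eq_true_eq] at hh
    obtain ⟨h1, h2⟩ := hh
    rw [pyGetD_cases g, hS.1, h1, pyGetD_cases, rowlen hS hy, h2]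
    rfl
  unfold gw
  split_ifs with h hb hb
  · rw [cell_ow hS e hy hx, if_pos hb.1]
  · rw [cell_ow hS e hy hx]
    by_cases hh : hit H W e y x = true
    · exact absurd ⟨hh, by rw [← htest hh]; exact h⟩ hb
    · simp [hh]
  · exact absurd ((htest hb.1).trans hb.2) h
  · rfl

theorem cell_foldl_ow {H W : Nat} (E : List (Int × Int × String)) :
    ∀ {g : List (List String)}, Shape H W g → ∀ {y x : Nat}, y < H → x < W →
    cell (E.foldl ow g) y x = (firstW H W E.reverse y x).getD (cell g y x) := by
  induction E with
  | nil => intro g _ y x _ _; simp [firstW]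
  | cons e E ih =>
    intro g hS y x hy hx
    rw [List.foldl_cons, ih (shape_ow hS e) hy hx, cell_ow hS e hy hx]
    simp only [List.reverse_cons, firstW, List.find?_append]
    cases hfind : (E.reverse.find? fun e => hit H W e y x) with
    | some s => simp
    | none =>
      by_cases hh : hit H W e y x = true
      · simp [List.find?, hh]
      · simp [List.find?, hh]

theorem cell_foldl_gw {H W : Nat} (E : List (Int × Int × String))
    (hch : ∀ e ∈ E, e.2.2 ≠ ".") :
    ∀ {g : List (List String)}, Shape H W g → ∀ {y x : Nat}, y < H → x < W →
    cell (E.foldl gw g) y x =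
      if cell g y x = "." then (firstW H W E y x).getD "." else cell g y x := by
  induction E with
  | nil => intro g _ y x _ _; simp [firstW]
  | cons e E ih =>
    intro g hS y x hy hx
    have hch' : ∀ e' ∈ E, e'.2.2 ≠ "." := fun e' h => hch e' (List.mem_cons_of_mem e h)
    rw [List.foldl_cons, ih hch' (shape_gw hS e) hy hx, cell_gw hS e hy hx]
    by_cases hh : hit H W e y x = true
    · by_cases hdot : cell g y x = "."
      · rw [if_pos (⟨hh, hdot⟩ : hit H W e y x = true ∧ cell g y x = ".")]
        have hne : e.2.2 ≠ "." := hch e (by simp)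
        rw [if_neg hne, if_pos hdot]
        simp [firstW, List.find?, hh]
      · have hnc : ¬(hit H W e y x = true ∧ cell g y x = ".") := fun hc => hdot hc.2
        rw [if_neg hnc, if_neg hdot, if_neg hdot]
    · have hnc : ¬(hit H W e y x = true ∧ cell g y x = ".") := fun hc => hh hc.1
      rw [if_neg hnc]
      have hfw : firstW H W (e :: E) y x = firstW H W E y x := by
        simp [firstW, List.find?, hh]
      rw [hfw]

theorem shape_foldl_ow {H W : Nat} (E : List (Int × Int × String)) :
    ∀ {g : List (List String)}, Shape H W g → Shape H W (E.foldl ow g) := by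
  intro g hS
  induction E generalizing g with
  | nil => exact hS
  | cons e E ih => exact ih (shape_ow hS e)

theorem shape_foldl_gw {H W : Nat} (E : List (Int × Int × String)) :
    ∀ {g : List (List String)}, Shape H W g → Shape H W (E.foldl gw g) := by
  intro g hS
  induction E generalizing g with
  | nil => exact hS
  | cons e E ih => exact ih (shape_gw hS e)

theorem grid_ext {H W : Nat} {g1 g2 : List (List String)}
    (h1 : Shape H W g1) (h2 : Shape H W g2)
    (hc : ∀ y x : Nat, y < H → x < W → cell g1 y x = cell g2 y x) : g1 = g2 := by
  apply List.ext_getElem (by rw [h1.1, h2.1])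
  intro i hi1 hi2
  apply List.ext_getElem
    (by rw [h1.2 _ (List.getElem_mem hi1), h2.2 _ (List.getElem_mem hi2)])
  intro j hj1 hj2
  have hiH : i < H := h1.1 ▸ hi1
  have hjW : j < W := (h1.2 _ (List.getElem_mem hi1)) ▸ hj1
  have := hc i j hiH hjW
  unfold cell at this
  rwa [List.getD_eq_getElem _ _ hi1, List.getD_eq_getElem _ _ hj1,
       List.getD_eq_getElem _ _ hi2, List.getD_eq_getElem _ _ hj2] at this

theorem evAll_chars (Y X maxY maxZ : Int) (data : List (List Int)) :
    ∀ e ∈ evAll Y X maxY maxZ data, e.2.2 ≠ "." := by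
  intro e he
  simp only [evAll, List.mem_flatMap] at he
  obtain ⟨z, _, y, _, x, _, he⟩ := he
  split at he
  · simp only [evBlock, List.mem_map] at he
    obtain ⟨o, ho, rfl⟩ := he
    simpa [shift] using (by decide : ∀ o ∈ offsA, o.2.2 ≠ ".") o ho
  · simp at he

theorem solve_eq_alt (Y X : Int) (data : List (List Int)) :
    solve Y X data = solve_alt Y X data := by
  rw [solve_eq_fold, solve_alt_eq_fold]
  have hS : Shape ((PySem.List.pyRange (Y-1) (-1) (-1)).foldl (fun m y =>
        max m (3*((PySem.List.max? (PySem.List.pyGetD data y []) id).getD 0) + 3 + 2*(Y-1 - y))) 5).toNat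
      (4*X + 2*Y + 1).toNat
      (List.replicate ((PySem.List.pyRange (Y-1) (-1) (-1)).foldl (fun m y =>
        max m (3*((PySem.List.max? (PySem.List.pyGetD data y []) id).getD 0) + 3 + 2*(Y-1 - y))) 5).toNat
        (List.replicate (4*X + 2*Y + 1).toNat ".")) := by
    refine ⟨List.length_replicate, fun r hr => ?_⟩
    rw [List.eq_of_mem_replicate hr]
    exact List.length_replicate
  refine grid_ext (shape_foldl_ow _ hS) (shape_foldl_gw _ hS) ?_
  intro y x hy hx
  rw [cell_foldl_ow _ hS hy hx,
      cell_foldl_gw _ (fun e he => evAll_chars _ _ _ _ _ e (List.mem_reverse.mp he)) hS hy hx]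
  have hc0 : cell (List.replicate ((PySem.List.pyRange (Y-1) (-1) (-1)).foldl (fun m y =>
        max m (3*((PySem.List.max? (PySem.List.pyGetD data y []) id).getD 0) + 3 + 2*(Y-1 - y))) 5).toNat
        (List.replicate (4*X + 2*Y + 1).toNat ".")) y x = "." := by
    have hrow : (List.replicate ((PySem.List.pyRange (Y-1) (-1) (-1)).foldl (fun m y =>
        max m (3*((PySem.List.max? (PySem.List.pyGetD data y []) id).getD 0) + 3 + 2*(Y-1 - y))) 5).toNat
        (List.replicate (4*X + 2*Y + 1).toNat ".")).getD y []
        = List.replicate (4*X + 2*Y + 1).toNat "." := by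
      rw [List.getD_eq_getElem _ _ (by simpa using hy)]
      exact List.getElem_replicate _
    unfold cell
    rw [hrow]
    rw [List.getD_eq_getElem _ _ (by simpa using hx)]
    exact List.getElem_replicate _
  rw [hc0]
  simp

-- ===== VERDICT (by name: the statement is the Claim_ definition above) =====
theorem solve_spec : Claim_equal_solve := by
  intro Y X data _ _
  unfold Spec_solve
  exact solve_eq_alt Y X data
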